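-- pv_equiv track=rewrite | github.com/Tessier-Lab-UMich/PSERM_paper | ngs.py | mut_to_cdr
-- ===== SOURCE A (Python) =====
-- def mut_to_cdr(wt_cdr_str, mut_pos, mut_str):
-- 	'''
-- 	converts between mut_str and cdr_str.
-- 	'''
-- 	cdr_str = ''
-- 	for i, aa in enumerate(wt_cdr_str):
-- 		if i in mut_pos:
-- 			cdr_str += mut_str[mut_pos.index(i)]
-- 		else:
-- 			cdr_str += aa
--
-- 	return cdr_str
-- ===== SOURCE B (Python) =====
-- def mut_to_cdr(wt_cdr_str, mut_pos, mut_str):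
--     chars = list(wt_cdr_str)
--     n = len(chars)
--     for p, c in reversed(list(zip(mut_pos, mut_str))):
--         if 0 <= p < n:
--             chars[p] = c
--     return ''.join(chars)
-- ===== Notes on version B (the rewrite author's own statement) =====
-- stated objective: faster
-- what changed: Instead of rebuilding the string position by position while searching mut_pos with 'in'/.index for each character, B copies the wildtype into a char list once and iterates over the zipped mutations in reverse, patching in-range positions by direct assignment (reverse order makes the first occurrence win, matching .index).
import Mathlib
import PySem

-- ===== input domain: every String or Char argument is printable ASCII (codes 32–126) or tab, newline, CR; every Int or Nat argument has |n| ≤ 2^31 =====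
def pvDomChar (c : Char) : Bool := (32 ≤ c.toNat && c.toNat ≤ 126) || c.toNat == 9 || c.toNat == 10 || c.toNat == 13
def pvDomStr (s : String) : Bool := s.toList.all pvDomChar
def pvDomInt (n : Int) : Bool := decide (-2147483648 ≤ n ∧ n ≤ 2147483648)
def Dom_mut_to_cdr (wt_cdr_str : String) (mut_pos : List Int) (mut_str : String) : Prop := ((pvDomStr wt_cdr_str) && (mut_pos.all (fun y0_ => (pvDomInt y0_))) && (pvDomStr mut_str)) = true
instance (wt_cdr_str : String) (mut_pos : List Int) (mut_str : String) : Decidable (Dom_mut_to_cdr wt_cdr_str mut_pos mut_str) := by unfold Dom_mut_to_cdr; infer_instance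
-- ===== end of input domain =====

-- B copies the wildtype into a char list once and patches it by iterating the zipped
-- mutations in reverse (first occurrence wins), instead of A's per-position search (faster).


-- ===== PORT A =====
-- the character(s) A appends for one enumerate step (i, aa); Option.toList is [] exactly
-- where Python's mut_str[mut_pos.index(i)] raises IndexError (excluded by Pre_)
def pvAChar (mut_pos : List Int) (mut_str : String) (p : Int × Char) : List Char :=
  if p.1 ∈ mut_pos then
    match PySem.List.index? mut_pos p.1 with
    | some j => (PySem.Str.pyGet? mut_str (j : Int)).toList
    | none => []
  else [p.2]

def mut_to_cdr (wt_cdr_str : String) (mut_pos : List Int) (mut_str : String) : String :=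
  String.ofList ((PySem.List.enumerate wt_cdr_str.toList).foldl
    (fun acc p => acc ++ pvAChar mut_pos mut_str p) [])

-- ===== PORT B =====
-- chars = list(wt); for p, c in reversed(list(zip(mut_pos, mut_str))): if 0 <= p < n: chars[p] = c
-- (the guarded chars[p] = c with 0 ≤ p < n is exactly List.set at p.toNat)
def mut_to_cdr_alt (wt_cdr_str : String) (mut_pos : List Int) (mut_str : String) : String :=
  let chars := wt_cdr_str.toList
  let n : Int := (chars.length : Int)
  String.ofList ((mut_pos.zip mut_str.toList).reverse.foldl
    (fun cs pc => if 0 ≤ pc.1 ∧ pc.1 < n then cs.set pc.1.toNat pc.2 else cs) chars)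

-- ===== PRECONDITION & SPEC =====
-- Pre_ excludes exactly the inputs where A raises IndexError: some position i of the
-- wildtype string occurs in mut_pos but its first index there is ≥ len(mut_str).
def Pre_mut_to_cdr (wt_cdr_str : String) (mut_pos : List Int) (mut_str : String) : Prop :=
  ((List.range wt_cdr_str.toList.length).all (fun i =>
    (PySem.List.index? mut_pos (i : Int)).all (fun j => decide (j < mut_str.toList.length)))) = true
instance (wt_cdr_str : String) (mut_pos : List Int) (mut_str : String) : Decidable (Pre_mut_to_cdr wt_cdr_str mut_pos mut_str) := by unfold Pre_mut_to_cdr; infer_instance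

def pvWitness_mut_to_cdr : String × List Int × String := ("QVQ", [1], "A")

def Spec_mut_to_cdr (wt_cdr_str : String) (mut_pos : List Int) (mut_str : String) (out : String) : Prop := out = mut_to_cdr_alt wt_cdr_str mut_pos mut_str
instance (wt_cdr_str : String) (mut_pos : List Int) (mut_str : String) (out : String) : Decidable (Spec_mut_to_cdr wt_cdr_str mut_pos mut_str out) := by unfold Spec_mut_to_cdr; infer_instance

-- ===== CLAIM (what is proved, stated in full; the proofs are below) =====
def Claim_equal_mut_to_cdr : Prop := ∀ (wt_cdr_str : String) (mut_pos : List Int) (mut_str : String), Dom_mut_to_cdr wt_cdr_str mut_pos mut_str → Pre_mut_to_cdr wt_cdr_str mut_pos mut_str → Spec_mut_to_cdr wt_cdr_str mut_pos mut_str (mut_to_cdr wt_cdr_str mut_pos mut_str)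

-- ===== LEMMAS AND PROOFS =====

-- first-match lookup in zip(mut_pos, cs) is: first index of k in mut_pos, then cs at it
lemma pv_lookup_zip (ps : List Int) (cs : List Char) (k : Int) :
    (ps.zip cs).lookup k = (PySem.List.index? ps k).bind (fun j => cs[j]?) := by
  induction ps generalizing cs with
  | nil => simp [PySem.List.index?]
  | cons p ps ih =>
    cases cs with
    | nil =>
      rcases h : PySem.List.index? (p :: ps) k with _ | j <;> simp
    | cons c cs =>
      by_cases h : p = k
      · subst h
        rw [PySem.List.index?_cons_self]
        simp
      · rw [PySem.List.index?_cons_of_ne _ h]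
        have hb : (k == p) = false := beq_eq_false_iff_ne.mpr (fun e => h e.symm)
        rw [List.zip_cons_cons]
        simp only [List.lookup, hb]
        rw [ih]
        cases PySem.List.index? ps k <;> simp

-- the patching fold never changes the length
lemma pv_patch_length (n : Int) (L : List (Int × Char)) (cs : List Char) :
    (L.foldr (fun pc cs' => if 0 ≤ pc.1 ∧ pc.1 < n then cs'.set pc.1.toNat pc.2 else cs') cs).length
      = cs.length := by
  induction L with
  | nil => rfl
  | cons pc L ih =>
    simp only [List.foldr_cons]
    split_ifs <;> simp [ih]

-- element i of the patched list = first mutation at i, else the original character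
lemma pv_patch_get (n : Int) (L : List (Int × Char)) (cs : List Char) (i : Nat)
    (hi : i < cs.length) (hin : (i : Int) < n) :
    (L.foldr (fun pc cs' => if 0 ≤ pc.1 ∧ pc.1 < n then cs'.set pc.1.toNat pc.2 else cs') cs)[i]?
      = (L.lookup (i : Int)).or cs[i]? := by
  induction L with
  | nil => simp
  | cons pc L ih =>
    rcases pc with ⟨p, c⟩
    simp only [List.foldr_cons, List.lookup]
    by_cases h : p = (i : Int)
    · subst h
      rw [if_pos ⟨by positivity, hin⟩]
      have hlen : i < (L.foldr (fun pc cs' => if 0 ≤ pc.1 ∧ pc.1 < n then cs'.set pc.1.toNat pc.2 else cs') cs).length := by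
        rw [pv_patch_length]; exact hi
      simp [hlen]
    · have hb : ((i : Int) == p) = false := beq_eq_false_iff_ne.mpr (fun e => h e.symm)
      simp only [hb]
      split_ifs with hg
      · have hne : p.toNat ≠ i := by omega
        rw [List.getElem?_set_ne hne, ih]
      · rw [ih]

-- foldl of appends equals acc ++ map when every step appends a singleton
lemma pv_foldl_eq_map {α : Type} (g : α → List Char) (f : α → Char) :
    ∀ (l : List α) (acc : List Char), (∀ p ∈ l, g p = [f p]) →
      l.foldl (fun a p => a ++ g p) acc = acc ++ l.map f := by
  intro l
  induction l with
  | nil => simp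
  | cons x xs ih =>
    intro acc h
    simp only [List.foldl_cons, List.map_cons]
    rw [h x (by simp), ih _ (fun p hp => h p (by simp [hp]))]
    simp

-- pointwise: A's appended chunk is the singleton of the first matching mutation (or wt char)
lemma pv_char_eq (mut_pos : List Int) (mut_str : String) (i : Nat)
    (hpre : ∀ j, PySem.List.index? mut_pos (i : Int) = some j → j < mut_str.toList.length)
    (aa : Char) :
    pvAChar mut_pos mut_str ((i : Int), aa)
      = [(((mut_pos.zip mut_str.toList).lookup (i : Int)).or (some aa)).getD aa] := by
  rw [pv_lookup_zip]
  simp only [pvAChar]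
  by_cases h : (i : Int) ∈ mut_pos
  · obtain ⟨j, hj⟩ := Option.isSome_iff_exists.mp ((PySem.List.index?_isSome_iff _ _).mpr h)
    have hlt : j < mut_str.toList.length := hpre j hj
    rw [if_pos h, hj]
    simp [List.getElem?_eq_getElem hlt]
  · rw [if_neg h, (PySem.List.index?_eq_none_iff mut_pos (i : Int)).mpr h]
    simp

-- ===== VERDICT (by name: the statement is the Claim_ definition above) =====
theorem mut_to_cdr_spec : Claim_equal_mut_to_cdr := by
  intro wt mut_pos mut_str _ hpre
  unfold Spec_mut_to_cdr mut_to_cdr mut_to_cdr_alt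
  show String.ofList ((PySem.List.enumerate wt.toList).foldl
      (fun acc p => acc ++ pvAChar mut_pos mut_str p) [])
    = String.ofList ((mut_pos.zip mut_str.toList).reverse.foldl
        (fun cs pc => if 0 ≤ pc.1 ∧ pc.1 < (wt.toList.length : Int) then cs.set pc.1.toNat pc.2 else cs)
        wt.toList)
  set L := mut_pos.zip mut_str.toList with hL
  set n : Int := (wt.toList.length : Int) with hn
  rw [List.foldl_reverse]
  have h : ∀ p ∈ PySem.List.enumerate wt.toList,
      pvAChar mut_pos mut_str p
        = [(fun p : Int × Char => ((L.lookup p.1).or (some p.2)).getD p.2) p] := by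
    intro p hp
    rcases (PySem.List.mem_enumerate_iff _ _ _).mp hp with ⟨k, hk, rfl⟩
    simp only [zero_add]
    apply pv_char_eq
    intro j hj
    unfold Pre_mut_to_cdr at hpre
    have := List.all_eq_true.mp hpre k (List.mem_range.mpr hk)
    rw [hj] at this
    simpa using this
  rw [pv_foldl_eq_map _ _ _ _ h]
  simp only [List.nil_append]
  congr 1
  apply List.ext_getElem?
  intro i
  by_cases hi : i < wt.toList.length
  · rw [List.getElem?_map, PySem.List.getElem?_enumerate,
      List.getElem?_eq_getElem hi, pv_patch_get n L wt.toList i hi (by rw [hn]; exact_mod_cast hi)]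
    rcases hc : List.lookup ((i : Nat) : Int) L with _ | c <;> simp [hc]
  · have h1 : (PySem.List.enumerate wt.toList).length ≤ i := by
      rw [PySem.List.length_enumerate]; omega
    rw [List.getElem?_map, List.getElem?_eq_none h1,
      List.getElem?_eq_none (by rw [pv_patch_length]; omega)]
    rfl
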